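-- pv_equiv track=rewrite | github.com/yairtitelboim/USA-HUBS | tools/add_100_more_counties.py | get_region_for_state
-- ===== SOURCE A (Python) =====
-- def get_region_for_state(state_fips):
--     """Get the region for a state FIPS code."""
--     # Define regions by state FIPS codes
--     regions = {
--         'northeast': ['09', '23', '25', '33', '44', '50', '34', '36', '42'],
--         'midwest': ['17', '18', '26', '39', '55', '19', '20', '27', '29', '31', '38', '46'],
--         'south': ['10', '12', '13', '24', '37', '45', '51', '11', '54',
--                   '01', '21', '28', '47', '05', '22', '40', '48'],
--         'west': ['04', '08', '16', '30', '32', '35', '49', '56',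
--                  '06', '41', '53'],
--         'alaska_hawaii': ['02', '15']
--     }
--
--     for region, states in regions.items():
--         if state_fips in states:
--             return region
--
--     return 'unknown'
-- ===== SOURCE B (Python) =====
-- # Region name per state FIPS number (index = int(code), 'unknown' for unassigned numbers).
-- _TABLE = [
--     'unknown', 'south', 'alaska_hawaii', 'unknown', 'west', 'south', 'west',
--     'unknown', 'west', 'northeast', 'south', 'south', 'south', 'south',
--     'unknown', 'alaska_hawaii', 'west', 'midwest', 'midwest', 'midwest',
--     'midwest', 'south', 'south', 'northeast', 'south', 'northeast', 'midwest',
--     'midwest', 'south', 'midwest', 'west', 'midwest', 'west', 'northeast',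
--     'northeast', 'west', 'northeast', 'south', 'midwest', 'midwest', 'south',
--     'west', 'northeast', 'unknown', 'northeast', 'south', 'midwest', 'south',
--     'south', 'west', 'northeast', 'south', 'unknown', 'west', 'south',
--     'midwest', 'west',
-- ]
--
-- def get_region_for_state(state_fips):
--     """Get the region for a state FIPS code."""
--     if len(state_fips) == 2 and state_fips.isdigit():
--         n = int(state_fips)
--         if n < len(_TABLE):
--             return _TABLE[n]
--     return 'unknown'
-- ===== Notes on version B (the rewrite author's own statement) =====
-- stated objective: alternative
-- what changed: Replaces the per-call loop over five region lists (a linear membership scan per region) with parsing the two-digit code to an integer and a single indexed lookup in a flat 57-entry table of region names.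
import Mathlib
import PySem

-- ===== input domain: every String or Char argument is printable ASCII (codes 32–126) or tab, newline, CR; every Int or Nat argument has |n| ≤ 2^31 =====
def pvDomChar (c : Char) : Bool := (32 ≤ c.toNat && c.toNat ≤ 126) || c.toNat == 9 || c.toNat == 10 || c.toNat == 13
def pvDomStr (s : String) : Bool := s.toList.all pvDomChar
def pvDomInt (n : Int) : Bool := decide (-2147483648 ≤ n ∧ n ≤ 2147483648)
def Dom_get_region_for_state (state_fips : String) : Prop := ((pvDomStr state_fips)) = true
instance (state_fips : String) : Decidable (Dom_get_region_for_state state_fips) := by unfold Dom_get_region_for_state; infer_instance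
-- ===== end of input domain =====

-- B replaces A's per-call loop over five region lists with one parse of the two-digit
-- code to an integer and a single indexed lookup in a flat table (alternative; no speed claim).


-- ===== PORT A =====
-- A's `regions` dict (insertion order), iterated as items
def pvRegionsA : List (String × List String) :=
  [("northeast", ["09", "23", "25", "33", "44", "50", "34", "36", "42"]),
   ("midwest", ["17", "18", "26", "39", "55", "19", "20", "27", "29", "31", "38", "46"]),
   ("south", ["10", "12", "13", "24", "37", "45", "51", "11", "54",
              "01", "21", "28", "47", "05", "22", "40", "48"]),
   ("west", ["04", "08", "16", "30", "32", "35", "49", "56",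
             "06", "41", "53"]),
   ("alaska_hawaii", ["02", "15"])]

-- the `for region, states in regions.items(): if state_fips in states: return region` loop
def pvRegionLoop (state_fips : String) : List (String × List String) → String
  | [] => "unknown"
  | (region, states) :: rest =>
      if states.contains state_fips then region else pvRegionLoop state_fips rest

def get_region_for_state (state_fips : String) : String :=
  pvRegionLoop state_fips pvRegionsA

-- ===== PORT B =====
-- B's `_TABLE`: region name per state FIPS number (index = int(code))
def pvRegionTable : List String :=
  ["unknown", "south", "alaska_hawaii", "unknown", "west", "south", "west",
   "unknown", "west", "northeast", "south", "south", "south", "south",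
   "unknown", "alaska_hawaii", "west", "midwest", "midwest", "midwest",
   "midwest", "south", "south", "northeast", "south", "northeast", "midwest",
   "midwest", "south", "midwest", "west", "midwest", "west", "northeast",
   "northeast", "west", "northeast", "south", "midwest", "midwest", "south",
   "west", "northeast", "unknown", "northeast", "south", "midwest", "south",
   "south", "west", "northeast", "south", "unknown", "west", "south",
   "midwest", "west"]

-- `if len(s) == 2 and s.isdigit(): n = int(s); if n < len(_TABLE): return _TABLE[n]; return 'unknown'`
-- (`int(s)` succeeds under the digit guard, so the `none` arm of `ofStr?` is unreachable;
--  `_TABLE[n]` is guarded in range, so `.getD "unknown"` of the always-`some` `pyGet?` is exact)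
def get_region_for_state_alt (state_fips : String) : String :=
  if PySem.Str.len state_fips == 2 && PySem.Str.strIsdigit state_fips then
    match PySem.Int.ofStr? state_fips with
    | some n =>
        if n < (pvRegionTable.length : Int) then
          (PySem.List.pyGet? pvRegionTable n).getD "unknown"
        else "unknown"
    | none => "unknown"
  else "unknown"

-- ===== PRECONDITION & SPEC =====
def Spec_get_region_for_state (state_fips : String) (out : String) : Prop :=
  out = get_region_for_state_alt state_fips
instance (state_fips : String) (out : String) : Decidable (Spec_get_region_for_state state_fips out) := by
  unfold Spec_get_region_for_state; infer_instance

-- ===== CLAIM =====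
def Claim_equal_get_region_for_state : Prop :=
  ∀ (state_fips : String), Dom_get_region_for_state state_fips →
    Spec_get_region_for_state state_fips (get_region_for_state state_fips)

-- ===== LEMMAS AND PROOFS =====

-- a char passing Python's isdigit is one of the ten digit literals
lemma pvDigit_enum (c : Char) (h : PySem.Chars.isdigit c = true) :
    c ∈ ['0', '1', '2', '3', '4', '5', '6', '7', '8', '9'] := by
  simp only [PySem.Chars.isdigit, Bool.and_eq_true, decide_eq_true_eq, Char.le_def,
    UInt32.le_iff_toNat_le] at h
  have h48 : 48 ≤ c.toNat := h.1
  have h57 : c.toNat ≤ 57 := h.2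
  have hc : c = Char.ofNat c.toNat := (Char.ofNat_toNat c).symm
  interval_cases hn : c.toNat <;> simp_all

-- A's loop returns 'unknown' when the input is in none of the region lists
lemma pvLoop_unknown (s : String) (rs : List (String × List String))
    (h : ∀ p ∈ rs, ∀ code ∈ p.2, s ≠ code) : pvRegionLoop s rs = "unknown" := by
  induction rs with
  | nil => rfl
  | cons p rest ih =>
      obtain ⟨region, states⟩ := p
      have hc : states.contains s = false := by
        simp only [List.contains_eq_mem, decide_eq_false_iff_not]
        intro hm
        exact h _ (List.mem_cons_self ..) s hm rfl
      simp only [pvRegionLoop, hc, Bool.false_eq_true, if_false]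
      exact ih fun p hp => h p (List.mem_cons_of_mem _ hp)

-- ===== VERDICT (by name: the statement is the Claim_ definition above) =====
theorem get_region_for_state_spec : Claim_equal_get_region_for_state := by
  intro s _
  show get_region_for_state s = get_region_for_state_alt s
  by_cases hg : (PySem.Str.len s == 2 && PySem.Str.strIsdigit s) = true
  · -- s is exactly two digit characters: 100 concrete cases
    have hg' := hg
    simp only [PySem.Str.len_eq, PySem.Str.strIsdigit_eq, PySem.Chars.strIsdigit,
      Bool.and_eq_true, beq_iff_eq, List.all_eq_true, List.isEmpty_eq_false_iff,
      Bool.not_eq_eq_eq_not, Bool.not_true] at hg'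
    have hlen : s.toList.length = 2 := by exact_mod_cast hg'.1
    obtain ⟨c1, c2, hl⟩ := List.length_eq_two.mp hlen
    have h1 : PySem.Chars.isdigit c1 = true := hg'.2.2 c1 (by rw [hl]; simp)
    have h2 : PySem.Chars.isdigit c2 = true := hg'.2.2 c2 (by rw [hl]; simp)
    have hs : s = String.ofList [c1, c2] := by rw [← String.ofList_toList (s := s), hl]
    subst hs
    have hm1 := pvDigit_enum c1 h1
    have hm2 := pvDigit_enum c2 h2
    fin_cases hm1 <;> fin_cases hm2 <;> decide
  · -- the guard fails: B is 'unknown' by its branch, A because s matches no code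
    rw [get_region_for_state_alt, if_neg hg]
    apply pvLoop_unknown
    intro p hp code hcode
    fin_cases hp <;> fin_cases hcode <;>
      (rintro rfl; exact hg (by decide))
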